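-- pv_equiv track=rewrite | github.com/diothor/dcp-python | problems/others/problem_716.py | valid_utf8_encoding
-- ===== SOURCE A (Python) =====
-- from typing import List
--
-- def ones_at_front(num: int, nbits) -> int:
--     bit_mask = 2 ** (nbits - 1)
--     nones = 0
--     while num & bit_mask > 0:
--         nones += 1
--         bit_mask >>= 1
--     else:
--         return nones
--
-- def bytes_in_word(_byte: int) -> int:
--     ones = ones_at_front(_byte, 8)
--     if ones == 1 or ones > 4:
--         raise ValueError
--     else:
--         return max(ones, 1)
--
-- def valid_utf8_encoding(bytes_to_check: List[int], start: int = 0, size: int = -1) -> bool: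
--     if size < 0:
--         size = len(bytes_to_check)
--
--     if size <= start:
--         return True
--     try:
--         count = bytes_in_word(bytes_to_check[start])
--         for i in range(start + 1, start + count):
--             if bytes_to_check[i] & 0b11000000 != 0b10000000:
--                 return False
--         else:
--             return valid_utf8_encoding(bytes_to_check, start + count, size)
--     except (ValueError, IndexError):
--         return False
-- ===== SOURCE B (Python) =====
-- def _char_len(b):
--     """Length of the UTF-8 character led by byte b, or None if b is not a valid lead byte."""
--     if b & 0x80 == 0:
--         return 1
--     if b & 0x40 == 0:
--         return None
--     if b & 0x20 == 0:
--         return 2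
--     if b & 0x10 == 0:
--         return 3
--     if b & 0x08 == 0:
--         return 4
--     return None
--
--
-- def valid_utf8_encoding(bytes_to_check, start=0, size=-1):
--     n = len(bytes_to_check)
--     if size < 0:
--         size = n
--     i = start
--     while i < size:
--         if i >= n:
--             return False
--         count = _char_len(bytes_to_check[i])
--         if count is None:
--             return False
--         for j in range(i + 1, i + count):
--             if j >= n or bytes_to_check[j] & 0xC0 != 0x80:
--                 return False
--         i += count
--     return True
-- ===== Notes on version B (the rewrite author's own statement) =====
-- stated objective: simpler
-- what changed: Replaces A's self-recursion with exception-driven control flow (a bit-mask shift loop counting leading ones plus a ValueError/IndexError try/except per character) by a single iterative while-loop that classifies each lead byte with four constant mask tests and uses explicit upper-bound checks instead of exceptions; Pre_ excludes only starts below -len(bytes) of a non-empty scan, where A's blanket except turns the IndexError into False while B's direct indexing raises.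
-- outside the precondition, e.g. on valid_utf8_encoding([128], -5, -1): A returns False, B raises IndexError
import Mathlib
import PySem

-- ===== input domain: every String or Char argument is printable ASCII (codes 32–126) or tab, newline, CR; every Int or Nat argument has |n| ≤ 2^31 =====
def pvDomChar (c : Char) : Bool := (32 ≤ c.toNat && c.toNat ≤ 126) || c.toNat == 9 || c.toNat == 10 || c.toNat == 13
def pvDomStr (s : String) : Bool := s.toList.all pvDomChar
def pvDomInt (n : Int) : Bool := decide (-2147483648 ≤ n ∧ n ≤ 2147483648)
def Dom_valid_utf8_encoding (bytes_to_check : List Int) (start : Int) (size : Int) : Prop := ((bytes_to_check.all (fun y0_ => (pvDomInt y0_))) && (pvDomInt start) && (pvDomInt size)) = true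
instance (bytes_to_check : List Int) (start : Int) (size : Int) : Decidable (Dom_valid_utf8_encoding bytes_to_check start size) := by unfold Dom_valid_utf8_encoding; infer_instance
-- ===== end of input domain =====

-- B replaces A's recursion-plus-exception control flow (leading-ones mask loop, ValueError/IndexError)
-- by one iterative scan with inline constant mask tests and explicit upper-bound checks (objective: simpler).

-- ===== PORT A =====
-- while num & bit_mask > 0: nones += 1; bit_mask >>= 1
-- (fuel only makes the loop structural; nbits iterations always suffice, as the mask is 0 afterwards)
def pvOnesLoop (num : Int) (bit_mask : Nat) (nones : Nat) (fuel : Nat) : Nat :=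
  match fuel with
  | 0 => nones
  | fuel + 1 =>
    if 0 < PySem.Int.band num (bit_mask : Int) then pvOnesLoop num (bit_mask / 2) (nones + 1) fuel
    else nones

def pvOnesAtFront (num : Int) (nbits : Nat) : Nat := pvOnesLoop num (2 ^ (nbits - 1)) 0 nbits

-- raise ValueError = none
def pvBytesInWord (b : Int) : Option Nat :=
  let ones := pvOnesAtFront b 8
  if ones = 1 ∨ 4 < ones then none else some (max ones 1)

-- for i in range(start+1, start+count): a failing test returns False, an IndexError is caught as False
def pvContA (bytes_to_check : List Int) (idxs : List Int) : Bool :=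
  match idxs with
  | [] => true
  | i :: rest =>
    match PySem.List.pyGet? bytes_to_check i with
    | none => false
    | some x => if PySem.Int.band x 192 ≠ 128 then false else pvContA bytes_to_check rest

-- the self-recursion of valid_utf8_encoding, made structural on fuel; the wrapper passes
-- fuel (sz - start).toNat, which never runs out since every step advances start by count ≥ 1
def pvGoA (bytes_to_check : List Int) (start sz : Int) (fuel : Nat) : Bool :=
  match fuel with
  | 0 => true
  | fuel + 1 =>
    if sz ≤ start then true
    else
      match PySem.List.pyGet? bytes_to_check start with
      | none => false
      | some b =>
        match pvBytesInWord b with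
        | none => false
        | some count =>
          if pvContA bytes_to_check (PySem.List.pyRange (start + 1) (start + (count : Int)) 1) then
            pvGoA bytes_to_check (start + (count : Int)) sz fuel
          else false

def valid_utf8_encoding (bytes_to_check : List Int) (start : Int) (size : Int) : Bool :=
  let sz : Int := if size < 0 then (bytes_to_check.length : Int) else size
  pvGoA bytes_to_check start sz ((sz - start).toNat)

-- ===== PORT B =====
-- the if/elif chain classifying a lead byte (None = the `return None` arms)
def pvClassify (b : Int) : Option Int :=
  if PySem.Int.band b 128 = 0 then some 1
  else if PySem.Int.band b 64 = 0 then none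
  else if PySem.Int.band b 32 = 0 then some 2
  else if PySem.Int.band b 16 = 0 then some 3
  else if PySem.Int.band b 8 = 0 then some 4
  else none

-- for j in range(i+1, i+count): 'j >= n or bytes_to_check[j] & 0xC0 != 0x80';
-- the read bytes_to_check[j] is in range under Pre_ (j > start ≥ -n and j < n), so pyGetD is exact there
def pvAltCont (bytes : List Int) (n : Int) (idxs : List Int) : Bool :=
  match idxs with
  | [] => true
  | j :: rest =>
    if n ≤ j then false
    else if PySem.Int.band (PySem.List.pyGetD bytes j 0) 192 ≠ 128 then false
    else pvAltCont bytes n rest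

-- while i < size (fuel (size - i).toNat: each pass advances i by count ≥ 1);
-- bytes_to_check[i] is in range under Pre_ (i ≥ start ≥ -n and i < n), so pyGetD is exact there
def pvAltGo (bytes : List Int) (n i size : Int) (fuel : Nat) : Bool :=
  match fuel with
  | 0 => true
  | fuel + 1 =>
    if i < size then
      if n ≤ i then false
      else
        match pvClassify (PySem.List.pyGetD bytes i 0) with
        | none => false
        | some count =>
          if pvAltCont bytes n (PySem.List.pyRange (i + 1) (i + count) 1) then
            pvAltGo bytes n (i + count) size fuel
          else false
    else true

def valid_utf8_encoding_alt (bytes_to_check : List Int) (start : Int) (size : Int) : Bool :=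
  let n : Int := (bytes_to_check.length : Int)
  let sz : Int := if size < 0 then n else size
  pvAltGo bytes_to_check n start sz ((sz - start).toNat)

-- ===== PRECONDITION & SPEC =====
-- Pre_ excludes only starts below -len(bytes_to_check) of a scan that actually runs: there A's blanket
-- except turns the IndexError into False, while B's direct indexing raises.
def Pre_valid_utf8_encoding (bytes_to_check : List Int) (start : Int) (size : Int) : Prop :=
  -(bytes_to_check.length : Int) ≤ start ∨
    (if size < 0 then (bytes_to_check.length : Int) else size) ≤ start
instance (bytes_to_check : List Int) (start : Int) (size : Int) : Decidable (Pre_valid_utf8_encoding bytes_to_check start size) := by unfold Pre_valid_utf8_encoding; infer_instance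

def pvWitness_valid_utf8_encoding : List Int × Int × Int := ([65, 195, 169], 0, -1)

def Spec_valid_utf8_encoding (bytes_to_check : List Int) (start : Int) (size : Int) (out : Bool) : Prop := out = valid_utf8_encoding_alt bytes_to_check start size
instance (bytes_to_check : List Int) (start : Int) (size : Int) (out : Bool) : Decidable (Spec_valid_utf8_encoding bytes_to_check start size out) := by unfold Spec_valid_utf8_encoding; infer_instance

-- ===== CLAIM (what is proved, stated in full; the proofs are below) =====
def Claim_equal_valid_utf8_encoding : Prop := ∀ (bytes_to_check : List Int) (start : Int) (size : Int), Dom_valid_utf8_encoding bytes_to_check start size → Pre_valid_utf8_encoding bytes_to_check start size → Spec_valid_utf8_encoding bytes_to_check start size (valid_utf8_encoding bytes_to_check start size)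

-- ===== LEMMAS AND PROOFS =====

-- Python truthiness of `num & mask` for a nonnegative mask
theorem pv_band_pos_iff (b m : Int) (hm : 0 ≤ m) :
    (0 < PySem.Int.band b m) ↔ ¬ PySem.Int.band b m = 0 := by
  have h : 0 ≤ PySem.Int.band b m := by
    rw [PySem.Int.band_comm]; exact PySem.Int.band_nonneg_of_nonneg_left b hm
  omega

theorem pv_onesLoop_le (b : Int) : ∀ (fuel mask nones : Nat), nones ≤ pvOnesLoop b mask nones fuel := by
  intro fuel
  induction fuel with
  | zero => intro mask nones; exact le_refl _
  | succ f ihf =>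
    intro mask nones
    rw [pvOnesLoop]
    split_ifs
    · exact le_trans (by omega) (ihf (mask / 2) (nones + 1))
    · exact le_refl _

theorem pv_classify_eq (b : Int) : pvClassify b = (pvBytesInWord b).map (fun c => (c : Int)) := by
  have s128 : ∀ k, pvOnesLoop b 128 k 8
      = if 0 < PySem.Int.band b 128 then pvOnesLoop b 64 (k + 1) 7 else k := fun k => rfl
  have s64 : ∀ k, pvOnesLoop b 64 k 7
      = if 0 < PySem.Int.band b 64 then pvOnesLoop b 32 (k + 1) 6 else k := fun k => rfl
  have s32 : ∀ k, pvOnesLoop b 32 k 6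
      = if 0 < PySem.Int.band b 32 then pvOnesLoop b 16 (k + 1) 5 else k := fun k => rfl
  have s16 : ∀ k, pvOnesLoop b 16 k 5
      = if 0 < PySem.Int.band b 16 then pvOnesLoop b 8 (k + 1) 4 else k := fun k => rfl
  have s8 : ∀ k, pvOnesLoop b 8 k 4
      = if 0 < PySem.Int.band b 8 then pvOnesLoop b 4 (k + 1) 3 else k := fun k => rfl
  have ones8 : pvOnesAtFront b 8 = pvOnesLoop b 128 0 8 := rfl
  have h7 := pv_band_pos_iff b 128 (by norm_num)
  have h6 := pv_band_pos_iff b 64 (by norm_num)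
  have h5 := pv_band_pos_iff b 32 (by norm_num)
  have h4 := pv_band_pos_iff b 16 (by norm_num)
  have h3 := pv_band_pos_iff b 8 (by norm_num)
  by_cases c7 : 0 < PySem.Int.band b 128
  · by_cases c6 : 0 < PySem.Int.band b 64
    · by_cases c5 : 0 < PySem.Int.band b 32
      · by_cases c4 : 0 < PySem.Int.band b 16
        · by_cases c3 : 0 < PySem.Int.band b 8
          · have n7 : ¬ PySem.Int.band b 128 = 0 := by omega
            have n6 : ¬ PySem.Int.band b 64 = 0 := by omega
            have n5 : ¬ PySem.Int.band b 32 = 0 := by omega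
            have n4 : ¬ PySem.Int.band b 16 = 0 := by omega
            have n3 : ¬ PySem.Int.band b 8 = 0 := by omega
            have hv : 4 < pvOnesAtFront b 8 := by
              rw [ones8, s128, if_pos c7, s64, if_pos c6, s32, if_pos c5, s16, if_pos c4,
                s8, if_pos c3]
              have := pv_onesLoop_le b 3 4 (0 + 1 + 1 + 1 + 1 + 1)
              omega
            simp [pvBytesInWord, pvClassify, hv, n7, n6, n5, n4, n3]
          · have n7 : ¬ PySem.Int.band b 128 = 0 := by omega
            have n6 : ¬ PySem.Int.band b 64 = 0 := by omega
            have n5 : ¬ PySem.Int.band b 32 = 0 := by omega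
            have n4 : ¬ PySem.Int.band b 16 = 0 := by omega
            have e3 : PySem.Int.band b 8 = 0 := by omega
            have hv : pvOnesAtFront b 8 = 4 := by
              rw [ones8, s128, if_pos c7, s64, if_pos c6, s32, if_pos c5, s16, if_pos c4,
                s8, if_neg c3]
            simp [pvBytesInWord, pvClassify, hv, n7, n6, n5, n4, e3]
        · have n7 : ¬ PySem.Int.band b 128 = 0 := by omega
          have n6 : ¬ PySem.Int.band b 64 = 0 := by omega
          have n5 : ¬ PySem.Int.band b 32 = 0 := by omega
          have e4 : PySem.Int.band b 16 = 0 := by omega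
          have hv : pvOnesAtFront b 8 = 3 := by
            rw [ones8, s128, if_pos c7, s64, if_pos c6, s32, if_pos c5, s16, if_neg c4]
          simp [pvBytesInWord, pvClassify, hv, n7, n6, n5, e4]
      · have n7 : ¬ PySem.Int.band b 128 = 0 := by omega
        have n6 : ¬ PySem.Int.band b 64 = 0 := by omega
        have e5 : PySem.Int.band b 32 = 0 := by omega
        have hv : pvOnesAtFront b 8 = 2 := by
          rw [ones8, s128, if_pos c7, s64, if_pos c6, s32, if_neg c5]
        simp [pvBytesInWord, pvClassify, hv, n7, n6, e5]
    · have n7 : ¬ PySem.Int.band b 128 = 0 := by omega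
      have e6 : PySem.Int.band b 64 = 0 := by omega
      have hv : pvOnesAtFront b 8 = 1 := by
        rw [ones8, s128, if_pos c7, s64, if_neg c6]
      simp [pvBytesInWord, pvClassify, hv, n7, e6]
  · have e7 : PySem.Int.band b 128 = 0 := by omega
    have hv : pvOnesAtFront b 8 = 0 := by
      rw [ones8, s128, if_neg c7]
    simp [pvBytesInWord, pvClassify, hv, e7]

-- on index lists bounded below by -len, A's caught-IndexError scan equals B's bounds-checked scan
theorem pv_cont_eq (bytes : List Int) : ∀ (idxs : List Int),
    (∀ j ∈ idxs, -(bytes.length : Int) ≤ j) →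
    pvContA bytes idxs = pvAltCont bytes (bytes.length : Int) idxs := by
  intro idxs
  induction idxs with
  | nil => intro _; rfl
  | cons j rest ihr =>
    intro hlo
    have hj : -(bytes.length : Int) ≤ j := hlo j (by simp)
    rw [pvContA, pvAltCont]
    rcases hget : PySem.List.pyGet? bytes j with _ | x
    · have hnin : ¬ (-(bytes.length : Int) ≤ j ∧ j < (bytes.length : Int)) :=
        (PySem.List.pyGet?_eq_none_iff bytes j).mp hget
      have hge : (bytes.length : Int) ≤ j := by omega
      rw [if_pos hge]
    · have hin : (-(bytes.length : Int) ≤ j ∧ j < (bytes.length : Int)) := by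
        by_contra hc
        rw [(PySem.List.pyGet?_eq_none_iff bytes j).mpr hc] at hget
        exact absurd hget (by simp)
      rw [if_neg (by omega)]
      have hgd : PySem.List.pyGetD bytes j 0 = x := by
        simp [PySem.List.pyGetD, hget]
      rw [hgd]
      show (if PySem.Int.band x 192 ≠ 128 then false else pvContA bytes rest) = _
      by_cases hband : PySem.Int.band x 192 = 128
      · rw [if_neg (not_not_intro hband), if_neg (not_not_intro hband)]
        exact ihr (fun k hk => hlo k (by simp [hk]))
      · rw [if_pos hband, if_pos hband]

theorem pv_go_eq (bytes : List Int) : ∀ (fuel : Nat) (start sz : Int),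
    (-(bytes.length : Int) ≤ start ∨ sz ≤ start) →
    pvGoA bytes start sz fuel = pvAltGo bytes (bytes.length : Int) start sz fuel := by
  intro fuel
  induction fuel with
  | zero => intro start sz _; rfl
  | succ f ihf =>
    intro start sz hpre
    rw [pvGoA, pvAltGo]
    by_cases hle : sz ≤ start
    · rw [if_pos hle, if_neg (by omega)]
    · rw [if_neg hle, if_pos (by omega)]
      have hlo : -(bytes.length : Int) ≤ start := by
        rcases hpre with h | h
        · exact h
        · omega
      rcases hget : PySem.List.pyGet? bytes start with _ | b
      · have hnin : ¬ (-(bytes.length : Int) ≤ start ∧ start < (bytes.length : Int)) :=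
          (PySem.List.pyGet?_eq_none_iff bytes start).mp hget
        rw [if_pos (by omega)]
      · have hin : (-(bytes.length : Int) ≤ start ∧ start < (bytes.length : Int)) := by
          by_contra hc
          rw [(PySem.List.pyGet?_eq_none_iff bytes start).mpr hc] at hget
          exact absurd hget (by simp)
        rw [if_neg (by omega)]
        have hgd : PySem.List.pyGetD bytes start 0 = b := by
          simp [PySem.List.pyGetD, hget]
        rw [hgd]
        show (match pvBytesInWord b with
            | none => false
            | some count =>
              if pvContA bytes (PySem.List.pyRange (start + 1) (start + (count : Int)) 1) = true then
                pvGoA bytes (start + (count : Int)) sz f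
              else false) = _
        rw [pv_classify_eq]
        rcases hbw : pvBytesInWord b with _ | count
        · rfl
        · have hcnt0 : (0 : Int) ≤ (count : Int) := by positivity
          have hrange : ∀ j ∈ PySem.List.pyRange (start + 1) (start + ((count : Nat) : Int)) 1,
              -(bytes.length : Int) ≤ j := by
            intro j hjmem
            have := (PySem.List.mem_pyRange_one.mp hjmem).1
            omega
          show (if pvContA bytes (PySem.List.pyRange (start + 1) (start + ((count : Nat) : Int)) 1) = true then
                pvGoA bytes (start + ((count : Nat) : Int)) sz f else false)
            = (if pvAltCont bytes (bytes.length : Int)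
                  (PySem.List.pyRange (start + 1) (start + ((count : Nat) : Int)) 1) = true then
                pvAltGo bytes (bytes.length : Int) (start + ((count : Nat) : Int)) sz f else false)
          rw [← pv_cont_eq bytes _ hrange]
          by_cases hcont : pvContA bytes (PySem.List.pyRange (start + 1) (start + ((count : Nat) : Int)) 1) = true
          · rw [if_pos hcont, if_pos hcont]
            exact ihf (start + ((count : Nat) : Int)) sz (Or.inl (by omega))
          · rw [if_neg hcont, if_neg hcont]

-- ===== VERDICT (by name: the statement is the Claim_ definition above) =====
theorem valid_utf8_encoding_spec : Claim_equal_valid_utf8_encoding := by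
  intro bytes_to_check start size _ hpre
  unfold Spec_valid_utf8_encoding valid_utf8_encoding valid_utf8_encoding_alt
  exact pv_go_eq bytes_to_check _ start _ hpre
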